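-- pv_equiv track=rewrite | github.com/WillyMaikowski/cc5509 | digitRecognition/utils.py | mBlackTopRight
-- ===== SOURCE A (Python) =====
-- BACKGROUND = 240
--
-- FOREGROUND = 0
--
-- MARKED = 1
--
-- def mBlackTopRight( img ):
--     aux = img.copy()
--     for i in range( len( aux ) ):
--         for j in range( len( aux[i] ) ):
--             if i-1 < 0 or j+1 >= len(aux[i]) or aux[i][j] == FOREGROUND:
--                 continue
--             elif aux[i][j] == BACKGROUND and ( aux[i - 1][j + 1] == FOREGROUND or aux[i - 1][j + 1] == MARKED ):
--                 aux[i][j] = MARKED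
--     return aux
-- ===== SOURCE B (Python) =====
-- # B: pure per-cell probe that walks the up-right chain of BACKGROUND pixels in the
-- # original image; returns the same value as A but does not mutate the argument's rows
-- # (A's equivalence is about the return value only).
-- BACKGROUND = 240
--
-- FOREGROUND = 0
--
-- MARKED = 1
--
--
-- def mBlackTopRight(img):
--     def chain_marked(i, j):
--         # does the up-right chain of BACKGROUND pixels starting at (i, j) end
--         # in a FOREGROUND or (originally) MARKED pixel?
--         while True:
--             if i == 0 or j + 1 >= len(img[i]):
--                 return False
--             v = img[i - 1][j + 1]
--             if v == FOREGROUND or v == MARKED: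
--                 return True
--             if v != BACKGROUND:
--                 return False
--             i, j = i - 1, j + 1
--
--     return [[MARKED if v == BACKGROUND and chain_marked(i, j) else v
--              for j, v in enumerate(row)]
--             for i, row in enumerate(img)]
-- ===== Notes on version B (the rewrite author's own statement) =====
-- stated objective: alternative
-- what changed: A runs an in-place row-major scan that marks a BACKGROUND cell by reading the already-processed up-right neighbour of a mutated copy; B is a pure per-cell probe that walks the up-right chain of BACKGROUND pixels in the ORIGINAL image to decide each output cell, building the result with nested comprehensions and never mutating anything.
import Mathlib
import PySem

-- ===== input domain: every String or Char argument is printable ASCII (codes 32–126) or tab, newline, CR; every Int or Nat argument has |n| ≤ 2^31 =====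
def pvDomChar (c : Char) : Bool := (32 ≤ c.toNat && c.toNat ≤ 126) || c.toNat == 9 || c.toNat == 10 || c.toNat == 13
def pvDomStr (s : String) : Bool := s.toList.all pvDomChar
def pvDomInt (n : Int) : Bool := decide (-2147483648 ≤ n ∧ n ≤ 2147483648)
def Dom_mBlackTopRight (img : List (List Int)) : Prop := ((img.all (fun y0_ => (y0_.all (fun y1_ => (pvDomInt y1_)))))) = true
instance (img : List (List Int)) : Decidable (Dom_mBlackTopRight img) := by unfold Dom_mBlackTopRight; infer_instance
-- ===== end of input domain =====

-- B replaces A's in-place neighbour-reading scan by a pure up-right chain probe per cell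
-- (objective: alternative); A mutates the argument's rows in place, B does not — the
-- equivalence proved here is about the return value only.

-- ===== PORT A =====
-- one body of A's double loop; indices are in range on Pre_ inputs (Python raises otherwise)
def stepA (aux : List (List Int)) (i j : Nat) : List (List Int) :=
  if i = 0 ∨ (aux.getD i []).length ≤ j + 1 ∨ (aux.getD i []).getD j 0 = 0 then aux
  else if (aux.getD i []).getD j 0 = 240 ∧
      ((aux.getD (i - 1) []).getD (j + 1) 0 = 0 ∨ (aux.getD (i - 1) []).getD (j + 1) 0 = 1) then
    aux.set i ((aux.getD i []).set j 1)
  else aux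

def mBlackTopRight (img : List (List Int)) : List (List Int) :=
  (List.range img.length).foldl (fun aux i =>
    (List.range (aux.getD i []).length).foldl (fun a j => stepA a i j) aux) img

-- ===== PORT B =====
-- chain_marked of Source B: the while-loop, structural recursion on the row index
def chainMarked (img : List (List Int)) : Nat → Nat → Bool
  | 0, _ => false
  | i + 1, j =>
    if (img.getD (i + 1) []).length ≤ j + 1 then false
    else
      let v := (img.getD i []).getD (j + 1) 0
      if v = 0 ∨ v = 1 then true
      else if v ≠ 240 then false
      else chainMarked img i (j + 1)

def mBlackTopRight_alt (img : List (List Int)) : List (List Int) :=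
  img.mapIdx fun i row => row.mapIdx fun j v =>
    if v = 240 ∧ chainMarked img i j = true then 1 else v

-- ===== PRECONDITION & SPEC =====
-- Pre_ excludes exactly the ragged images on which Python A raises IndexError
-- (a BACKGROUND cell whose up-right read falls past the end of the shorter row above).
def Pre_mBlackTopRight (img : List (List Int)) : Prop :=
  ∀ i < img.length, ∀ j < (img.getD i []).length,
    (0 < i ∧ j + 1 < (img.getD i []).length ∧ (img.getD i []).getD j 0 = 240) →
    j + 1 < (img.getD (i - 1) []).length
instance (img : List (List Int)) : Decidable (Pre_mBlackTopRight img) := by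
  unfold Pre_mBlackTopRight; infer_instance

def pvWitness_mBlackTopRight : List (List Int) := [[0, 240], [240, 240]]

def Spec_mBlackTopRight (img : List (List Int)) (out : List (List Int)) : Prop := out = mBlackTopRight_alt img
instance (img : List (List Int)) (out : List (List Int)) : Decidable (Spec_mBlackTopRight img out) := by unfold Spec_mBlackTopRight; infer_instance

-- ===== CLAIM (what is proved, stated in full; the proofs are below) =====
def Claim_equal_mBlackTopRight : Prop := ∀ (img : List (List Int)), Dom_mBlackTopRight img → Pre_mBlackTopRight img → Spec_mBlackTopRight img (mBlackTopRight img)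

-- ===== LEMMAS AND PROOFS =====

-- generic list helpers
theorem pv_getD_append_len {α : Type} (P : List α) (x : α) (S : List α) (d : α) :
    (P ++ x :: S).getD P.length d = x := by
  induction P with
  | nil => simp [List.getD]
  | cons a P ih => simpa [List.getD] using ih

theorem pv_getD_append_lt {α : Type} (P S : List α) (d : α) (k : Nat) (h : k < P.length) :
    (P ++ S).getD k d = P.getD k d := by
  induction P generalizing k with
  | nil => simp at h
  | cons a P ih =>
    cases k with
    | zero => simp [List.getD]
    | succ k => simpa [List.getD] using ih k (by simpa using h)

theorem pv_set_append_len {α : Type} (P : List α) (x y : α) (S : List α) :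
    (P ++ x :: S).set P.length y = P ++ y :: S := by
  induction P with
  | nil => simp
  | cons a P ih => simpa using ih

theorem alt_length (img : List (List Int)) : (mBlackTopRight_alt img).length = img.length := by
  simp [mBlackTopRight_alt]

theorem alt_getD (img : List (List Int)) (i : Nat) (hi : i < img.length) :
    (mBlackTopRight_alt img).getD i [] =
      (img.getD i []).mapIdx (fun j v => if v = 240 ∧ chainMarked img i j = true then 1 else v) := by
  rw [List.getD_eq_getElem _ _ (by simpa [alt_length] using hi)]
  rw [List.getD_eq_getElem _ _ hi]
  simp [mBlackTopRight_alt]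

theorem alt_cell (img : List (List Int)) (i j : Nat) (hi : i < img.length)
    (hj : j < (img.getD i []).length) :
    ((mBlackTopRight_alt img).getD i []).getD j 0 =
      (if (img.getD i []).getD j 0 = 240 ∧ chainMarked img i j = true then 1
       else (img.getD i []).getD j 0) := by
  rw [alt_getD img i hi]
  rw [List.getD_eq_getElem _ _ (by simpa using hj), List.getD_eq_getElem _ _ hj]
  simp [List.getElem_mapIdx]

theorem pv_getD_take {α : Type} (l : List α) (i k : Nat) (d : α) (h : k < i) (h2 : k < l.length) :
    (l.take i).getD k d = l.getD k d := by
  rw [List.getD_eq_getElem _ _ (by simp [h, h2]), List.getD_eq_getElem _ _ h2]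
  simp

theorem neighbor (img : List (List Int)) (i j : Nat) (hi : i + 1 < img.length)
    (hj : j + 1 < (img.getD (i + 1) []).length) :
    ((((mBlackTopRight_alt img).getD i []).getD (j + 1) 0 = 0) ∨
      (((mBlackTopRight_alt img).getD i []).getD (j + 1) 0 = 1))
      ↔ chainMarked img (i + 1) j = true := by
  have hi' : i < img.length := Nat.lt_of_succ_lt hi
  rw [chainMarked, if_neg (not_le.mpr hj)]
  by_cases h : j + 1 < (img.getD i []).length
  · rw [alt_cell img i (j + 1) hi' h]
    set u := (img.getD i []).getD (j + 1) 0 with hu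
    by_cases h0 : u = 0 ∨ u = 1
    · simp only [h0, if_true]
      rcases h0 with h0 | h0 <;> simp [h0]
    · simp only [h0, if_false]
      by_cases h240 : u = 240
      · simp only [h240, ne_eq, not_true_eq_false, if_false, if_true, true_and]
        by_cases hc : chainMarked img i (j + 1) = true
        · simp [hc]
        · simp [hc]
      · push_neg at h0
        simp [h240, h0.1, h0.2]
  · have hb : ((mBlackTopRight_alt img).getD i []).getD (j + 1) 0 = 0 := by
      rw [alt_getD img i hi', List.getD_eq_getElem?_getD,
        List.getElem?_eq_none (by simpa using not_lt.mp h)]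
      rfl
    have hu : (img.getD i []).getD (j + 1) 0 = 0 := by
      rw [List.getD_eq_getElem?_getD, List.getElem?_eq_none (not_lt.mp h)]
      rfl
    simp only [List.getD_eq_getElem?_getD] at hb hu
    simp [hb, hu]

theorem pv_getD_append_at {α : Type} (P : List α) (x : α) (S : List α) (d : α) (k : Nat)
    (h : k = P.length) : (P ++ x :: S).getD k d = x := by
  subst h; exact pv_getD_append_len P x S d

theorem pv_set_append_at {α : Type} (P : List α) (x y : α) (S : List α) (k : Nat)
    (h : k = P.length) : (P ++ x :: S).set k y = P ++ y :: S := by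
  subst h; exact pv_set_append_len P x y S

theorem step_eq (img : List (List Int)) (i j : Nat) (hi : i < img.length)
    (hj : j < (img.getD i []).length) :
    stepA ((mBlackTopRight_alt img).take i ++
        (((mBlackTopRight_alt img).getD i []).take j ++ (img.getD i []).drop j) :: img.drop (i + 1)) i j
      = (mBlackTopRight_alt img).take i ++
        (((mBlackTopRight_alt img).getD i []).take (j + 1) ++ (img.getD i []).drop (j + 1)) :: img.drop (i + 1) := by
  set out := mBlackTopRight_alt img with hout
  set cur := img.getD i [] with hcur
  set b := out.getD i [] with hb
  have houtlen : out.length = img.length := alt_length img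
  have hPlen : (out.take i).length = i := by
    simp [houtlen, Nat.le_of_lt hi]
  have hbeq : b = cur.mapIdx (fun j v => if v = 240 ∧ chainMarked img i j = true then 1 else v) :=
    alt_getD img i hi
  have hblen : b.length = cur.length := by rw [hbeq]; simp
  have hjb : j < b.length := hblen ▸ hj
  have htkj : (b.take j).length = j := by simp [Nat.le_of_lt hjb]
  have hbj : b[j]'hjb = if cur[j]'hj = 240 ∧ chainMarked img i j = true then 1 else cur[j]'hj := by
    simp only [hbeq, List.getElem_mapIdx]
  have hdrop : cur.drop j = cur[j]'hj :: cur.drop (j + 1) := List.drop_eq_getElem_cons hj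
  have htake1 : b.take (j + 1) = b.take j ++ [b[j]'hjb] := by
    rw [← List.take_concat_get hjb, List.concat_eq_append]
  set S := img.drop (i + 1) with hS
  set mid := b.take j ++ cur[j]'hj :: cur.drop (j + 1) with hmid
  have hmidget : (out.take i ++ mid :: S).getD i [] = mid :=
    pv_getD_append_at _ _ _ _ i hPlen.symm
  have hmidlen : mid.length = cur.length := by
    simp only [hmid, List.length_append, List.length_cons, List.length_drop, htkj]
    omega
  have hmidj : mid.getD j 0 = cur[j]'hj :=
    pv_getD_append_at _ _ _ _ j htkj.symm
  have hcurj : cur.getD j 0 = cur[j]'hj := List.getD_eq_getElem _ _ hj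
  rw [hdrop]
  show stepA (out.take i ++ mid :: S) i j = out.take i ++ (b.take (j + 1) ++ cur.drop (j + 1)) :: S
  rw [htake1]
  by_cases hA : i = 0 ∨ mid.length ≤ j + 1 ∨ mid.getD j 0 = 0
  · rw [stepA, hmidget, if_pos hA]
    have hbjv : b[j]'hjb = cur[j]'hj := by
      rcases hA with h0 | hlen | h00
      · subst h0
        rw [hbj]
        simp [chainMarked]
      · rw [hmidlen] at hlen
        rw [hbj]
        have hcfalse : chainMarked img i j = false := by
          cases i with
          | zero => rfl
          | succ k => rw [chainMarked, if_pos (by rw [← hcur]; omega)]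
        simp [hcfalse]
      · rw [hmidj] at h00
        rw [hbj, h00]
        simp
    rw [hbjv]
    simp [hmid]
  · have hA' := hA
    push_neg at hA'
    obtain ⟨hi0, hlen, hnz⟩ := hA'
    rw [hmidlen] at hlen
    rw [hmidj] at hnz
    obtain ⟨k, rfl⟩ : ∃ k, i = k + 1 := ⟨i - 1, by omega⟩
    have hrd : (out.take (k + 1) ++ mid :: S).getD (k + 1 - 1) [] = out.getD k [] := by
      rw [Nat.add_sub_cancel, pv_getD_append_lt _ _ _ k (by omega)]
      exact pv_getD_take out (k + 1) k [] (Nat.lt_succ_self k) (by rw [houtlen]; omega)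
    have hnb : ((out.getD k []).getD (j + 1) 0 = 0 ∨ (out.getD k []).getD (j + 1) 0 = 1)
        ↔ chainMarked img (k + 1) j = true :=
      neighbor img k j hi (by rw [← hcur]; omega)
    rw [stepA, hmidget, if_neg hA, hrd]
    by_cases hM : mid.getD j 0 = 240 ∧
        ((out.getD k []).getD (j + 1) 0 = 0 ∨ (out.getD k []).getD (j + 1) 0 = 1)
    · rw [if_pos hM]
      obtain ⟨h240, hr⟩ := hM
      rw [hmidj] at h240
      have hchain : chainMarked img (k + 1) j = true := hnb.mp hr
      have hbj1 : b[j]'hjb = 1 := by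
        rw [hbj, if_pos ⟨h240, hchain⟩]
      rw [pv_set_append_at _ _ _ _ _ hPlen.symm,
        pv_set_append_at _ _ _ _ _ htkj.symm, hbj1]
      simp
    · rw [if_neg hM]
      have hbjv : b[j]'hjb = cur[j]'hj := by
        rw [hbj]
        rcases (not_and_or.mp hM) with h240 | hr
        · rw [hmidj] at h240
          rw [if_neg (by tauto)]
        · have : ¬ chainMarked img (k + 1) j = true := fun hc => hr (hnb.mpr hc)
          rw [if_neg (by tauto)]
      rw [hbjv]
      simp [hmid]

theorem inner_eq (img : List (List Int)) (i : Nat) (hi : i < img.length) :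
    ∀ j, j ≤ (img.getD i []).length →
    (List.range j).foldl (fun a j' => stepA a i j')
        ((mBlackTopRight_alt img).take i ++ (img.getD i []) :: img.drop (i + 1))
      = (mBlackTopRight_alt img).take i ++
          (((mBlackTopRight_alt img).getD i []).take j ++ (img.getD i []).drop j) :: img.drop (i + 1) := by
  intro j hj
  induction j with
  | zero => simp
  | succ j ih =>
    rw [List.range_succ, List.foldl_append, ih (Nat.le_of_succ_le hj)]
    simp only [List.foldl_cons, List.foldl_nil]
    exact step_eq img i j hi (Nat.lt_of_succ_le hj)

theorem outer_eq (img : List (List Int)) :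
    ∀ i, i ≤ img.length →
    (List.range i).foldl (fun aux i' =>
        (List.range (aux.getD i' []).length).foldl (fun a j => stepA a i' j) aux) img
      = (mBlackTopRight_alt img).take i ++ img.drop i := by
  intro i hi
  induction i with
  | zero => simp
  | succ i ih =>
    have hi' : i < img.length := Nat.lt_of_succ_le hi
    rw [List.range_succ, List.foldl_append, ih (Nat.le_of_lt hi')]
    simp only [List.foldl_cons, List.foldl_nil]
    have houtlen : (mBlackTopRight_alt img).length = img.length := alt_length img
    have hPlen : ((mBlackTopRight_alt img).take i).length = i := by
      simp [houtlen, Nat.le_of_lt hi']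
    rw [List.drop_eq_getElem_cons hi']
    have hgd : (((mBlackTopRight_alt img).take i ++ img[i]'hi' :: img.drop (i + 1)).getD i []) =
        img[i]'hi' := pv_getD_append_at _ _ _ _ i hPlen.symm
    rw [hgd]
    have hcur : (img.getD i []) = img[i]'hi' := List.getD_eq_getElem _ _ hi'
    have := inner_eq img i hi' (img.getD i []).length (le_refl _)
    rw [hcur] at this
    rw [this, ← hcur]
    have hblen : ((mBlackTopRight_alt img).getD i []).length = (img.getD i []).length := by
      rw [alt_getD img i hi']; simp
    have hrow : ((mBlackTopRight_alt img).getD i []).take (img.getD i []).length ++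
        (img.getD i []).drop (img.getD i []).length = (mBlackTopRight_alt img).getD i [] := by
      rw [List.drop_length, ← hblen, List.take_length, List.append_nil]
    rw [hrow, List.getD_eq_getElem _ _ (by omega : i < (mBlackTopRight_alt img).length)]
    have htk : (mBlackTopRight_alt img).take (i + 1) =
        (mBlackTopRight_alt img).take i ++ [(mBlackTopRight_alt img)[i]'(by omega)] := by
      rw [← List.take_concat_get (by omega), List.concat_eq_append]
    rw [htk, List.append_assoc]
    rfl

theorem ports_eq (img : List (List Int)) : mBlackTopRight img = mBlackTopRight_alt img := by
  rw [mBlackTopRight, outer_eq img img.length (le_refl _)]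
  simp [alt_length]

-- ===== VERDICT (by name: the statement is the Claim_ definition above) =====
theorem mBlackTopRight_spec : Claim_equal_mBlackTopRight := by
  intro img _ _
  unfold Spec_mBlackTopRight
  exact ports_eq img
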